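-- pv_equiv track=rewrite | github.com/Nenavathnaresh/Python_DSA | Greedy-Algorithms/Medium/binary-searchable-elements.py | binarySearchable
-- ===== SOURCE A (Python) =====
-- from typing import List
--
-- def binarySearchable(n: int, arr: List[int]) -> int:
--     # Step 1: Initialize max_left and min_right arrays
--     max_left = [float('-inf')] * n
--     min_right = [float('inf')] * n
--
--     # Step 2: Fill the max_left array
--     for i in range(1, n):
--         max_left[i] = max(max_left[i - 1], arr[i - 1])
--
--     # Step 3: Fill the min_right array
--     for i in range(n - 2, -1, -1):
--         min_right[i] = min(min_right[i + 1], arr[i + 1])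
--
--     # Step 4: Count binary searchable elements
--     count = 0
--     for i in range(n):
--         if max_left[i] < arr[i] < min_right[i]:
--             count += 1
--
--     return count
-- ===== SOURCE B (Python) =====
-- def binarySearchable(n, arr):
--     # Single forward pass with a monotonic stack of still-alive candidates.
--     # An element is binary-searchable iff it exceeds everything before it
--     # (so it gets pushed) and is below everything after it (so it is never
--     # popped by a later element <= it).  The answer is the surviving stack size.
--     stack = []
--     left_max = None
--     for i in range(n):
--         x = arr[i]
--         while stack and stack[-1] >= x:
--             stack.pop()
--         if left_max is None or left_max < x:
--             stack.append(x)
--             left_max = x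
--     return len(stack)
-- ===== Notes on version B (the rewrite author's own statement) =====
-- stated objective: alternative
-- what changed: Replaces A's three staged passes over precomputed max-left/min-right arrays with a single forward pass over a monotonic stack: candidates that beat the running maximum are pushed, later smaller-or-equal elements pop dead candidates, and the answer is the surviving stack size.
import Mathlib
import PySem

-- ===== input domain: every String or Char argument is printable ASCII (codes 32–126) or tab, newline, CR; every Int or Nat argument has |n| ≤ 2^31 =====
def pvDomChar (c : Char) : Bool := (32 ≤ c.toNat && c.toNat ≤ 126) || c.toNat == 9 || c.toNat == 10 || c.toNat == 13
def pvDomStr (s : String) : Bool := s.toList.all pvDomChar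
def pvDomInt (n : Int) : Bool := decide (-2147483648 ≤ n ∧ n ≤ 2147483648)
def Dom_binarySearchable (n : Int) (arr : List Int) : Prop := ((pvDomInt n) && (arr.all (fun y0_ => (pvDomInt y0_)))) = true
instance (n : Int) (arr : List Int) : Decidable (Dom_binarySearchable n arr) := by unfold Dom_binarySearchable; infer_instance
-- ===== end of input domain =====

-- B replaces A's three staged passes over two auxiliary max-left/min-right arrays by a single
-- forward pass over a monotonic stack of surviving candidates (alternative algorithm; return
-- value only, neither program mutates its arguments).

-- ===== PORT A =====
-- float('-inf') / float('inf') sentinels are modelled as `none`; these helpers are Python's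
-- max/min against such a sentinel (exact: the sentinels only ever meet int values).
def omaxA : Option Int → Int → Option Int
  | none, x => some x
  | some m, x => some (max m x)

def ominA : Option Int → Int → Option Int
  | none, x => some x
  | some m, x => some (min m x)

-- `maxLeftVal < x` where `none` is -inf
def oltL : Option Int → Int → Bool
  | none, _ => true
  | some m, x => decide (m < x)

-- `x < minRightVal` where `none` is +inf
def oltR : Int → Option Int → Bool
  | _, none => true
  | x, some m => decide (x < m)

def binarySearchable (n : Int) (arr : List Int) : Int :=
  -- Step 1: initialize max_left and min_right arrays
  let maxLeft0 : List (Option Int) := List.replicate n.toNat none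
  let minRight0 : List (Option Int) := List.replicate n.toNat none
  -- Step 2: fill the max_left array
  let maxLeft := (PySem.List.pyRange 1 n 1).foldl
    (fun ml i => PySem.List.pySetD ml i
      (omaxA (PySem.List.pyGetD ml (i - 1) none) (PySem.List.pyGetD arr (i - 1) 0))) maxLeft0
  -- Step 3: fill the min_right array
  let minRight := (PySem.List.pyRange (n - 2) (-1) (-1)).foldl
    (fun mr i => PySem.List.pySetD mr i
      (ominA (PySem.List.pyGetD mr (i + 1) none) (PySem.List.pyGetD arr (i + 1) 0))) minRight0
  -- Step 4: count binary searchable elements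
  (PySem.List.pyRange 0 n 1).foldl
    (fun count i =>
      if oltL (PySem.List.pyGetD maxLeft i none) (PySem.List.pyGetD arr i 0)
          && oltR (PySem.List.pyGetD arr i 0) (PySem.List.pyGetD minRight i none) then count + 1
      else count) 0

-- ===== PORT B =====
-- B's stack is kept TOP-FIRST (Python's stack[-1]/append/pop at the end become head/cons/tail);
-- popGE is B's `while stack and stack[-1] >= x: stack.pop()` loop.
def popGE : List Int → Int → List Int
  | [], _ => []
  | t :: rest, x => if x ≤ t then popGE rest x else t :: rest

def binarySearchable_alt (n : Int) (arr : List Int) : Int :=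
  -- state: (stack top-first, left_max); `none` is Python's None
  let res := (PySem.List.pyRange 0 n 1).foldl
    (fun (s : List Int × Option Int) i =>
      let x := PySem.List.pyGetD arr i 0
      let st := popGE s.1 x
      if s.2.isNone || decide (s.2.getD 0 < x) then (x :: st, some x) else (st, s.2))
    ([], none)
  (res.1.length : Int)

-- ===== PRECONDITION & SPEC =====
-- Pre_ excludes exactly the inputs on which the Python A raises IndexError: n > len(arr).
def Pre_binarySearchable (n : Int) (arr : List Int) : Prop := n ≤ (arr.length : Int)
instance (n : Int) (arr : List Int) : Decidable (Pre_binarySearchable n arr) := by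
  unfold Pre_binarySearchable; infer_instance

def pvWitness_binarySearchable : Int × List Int := (5, [1, 3, 2, 4, 5])

def Spec_binarySearchable (n : Int) (arr : List Int) (out : Int) : Prop :=
  out = binarySearchable_alt n arr
instance (n : Int) (arr : List Int) (out : Int) : Decidable (Spec_binarySearchable n arr out) := by
  unfold Spec_binarySearchable; infer_instance

-- ===== CLAIM (what is proved, stated in full; the proofs are below) =====
def Claim_equal_binarySearchable : Prop := ∀ (n : Int) (arr : List Int),
  Dom_binarySearchable n arr → Pre_binarySearchable n arr →
  Spec_binarySearchable n arr (binarySearchable n arr)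

-- ===== LEMMAS AND PROOFS =====

-- prefix maximum of arr[0..k-1] (none = nothing yet)
def pmax (arr : List Int) : Nat → Option Int
  | 0 => none
  | k + 1 => omaxA (pmax arr k) (arr.getD k 0)

-- minimum of the k elements arr[j..j+k-1] (none = nothing)
def smin (arr : List Int) : Nat → Nat → Option Int
  | _, 0 => none
  | j, k + 1 => ominA (smin arr (j + 1) k) (arr.getD j 0)

-- "binary-searchable at index i within the prefix of length n'"
def Pn (arr : List Int) (n' i : Nat) : Bool :=
  oltL (pmax arr i) (arr.getD i 0) && oltR (arr.getD i 0) (smin arr (i + 1) (n' - 1 - i))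

-- ---------- A's loops (prefix/suffix arrays) ----------

-- A's Step-2 loop fills max_left with prefix maxima
theorem mlLoop (arr : List Int) (n' : Nat) (k : Nat) (hk1 : 1 ≤ k) (hk : k ≤ n') :
    (PySem.List.pyRange 1 (k : Int)).foldl
      (fun ml i => PySem.List.pySetD ml i
        (omaxA (PySem.List.pyGetD ml (i - 1) none) (PySem.List.pyGetD arr (i - 1) 0)))
      (List.replicate n' none)
    = (List.range k).map (pmax arr) ++ List.replicate (n' - k) none := by
  induction k with
  | zero => omega
  | succ k ih =>
    rcases Nat.lt_or_ge k 1 with h1 | h1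
    · interval_cases k
      rw [PySem.List.pyRange_one_eq_nil (by norm_num)]
      obtain ⟨m, rfl⟩ : ∃ m, n' = m + 1 := ⟨n' - 1, by omega⟩
      simp [List.replicate_succ, pmax]
    · rw [show ((k + 1 : Nat) : Int) = (k : Int) + 1 by push_cast; ring,
        PySem.List.pyRange_one_succ_right (by exact_mod_cast h1),
        List.foldl_append, ih h1 (by omega), List.foldl_cons, List.foldl_nil,
        show (k : Int) - 1 = ((k - 1 : Nat) : Int) by omega,
        PySem.List.pyGetD_natCast, PySem.List.pyGetD_natCast, PySem.List.pySetD_natCast,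
        List.getD_append _ _ _ _ (by simp; omega),
        PySem.List.getD_map_range _ _ _ _ (by omega),
        List.set_append]
      simp only [List.length_map, List.length_range]
      rw [if_neg (by omega), Nat.sub_self]
      obtain ⟨m, hm⟩ : ∃ m, n' - k = m + 1 := ⟨n' - k - 1, by omega⟩
      rw [hm, List.replicate_succ, List.set_cons_zero, List.range_succ, List.map_append]
      have hv : omaxA (pmax arr (k - 1)) (arr.getD (k - 1) 0) = pmax arr k := by
        obtain ⟨j, rfl⟩ : ∃ j, k = j + 1 := ⟨k - 1, by omega⟩
        simp [pmax]
      rw [hv, show n' - (k + 1) = m by omega]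
      simp

-- the shape of min_right after the Step-3 loop has run down to index j
def MRL (arr : List Int) (n' j : Nat) : List (Option Int) :=
  List.replicate j none ++
    (List.range (n' - j)).map (fun t => smin arr (j + t + 1) (n' - 1 - (j + t)))

theorem MRL_zero (arr : List Int) (n' : Nat) :
    MRL arr n' 0 = (List.range n').map (fun t => smin arr (t + 1) (n' - 1 - t)) := by
  simp [MRL]

theorem MRL_last (arr : List Int) (n' : Nat) (h : 1 ≤ n') :
    MRL arr n' (n' - 1) = List.replicate n' none := by
  unfold MRL
  rw [show n' - (n' - 1) = 1 by omega]
  simp only [List.range_one, List.map_cons, List.map_nil]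
  rw [show n' - 1 + 0 + 1 = n' by omega, show n' - 1 - (n' - 1 + 0) = 0 by omega]
  rw [show n' = (n' - 1) + 1 by omega]
  simp [List.replicate_succ', smin]

-- A's Step-3 loop, run from index j-1 downwards
theorem mrLoop (arr : List Int) (n' : Nat) (j : Nat) (hj : j + 1 ≤ n') :
    (PySem.List.pyRange ((j : Int) - 1) (-1) (-1)).foldl
      (fun mr i => PySem.List.pySetD mr i
        (ominA (PySem.List.pyGetD mr (i + 1) none) (PySem.List.pyGetD arr (i + 1) 0)))
      (MRL arr n' j)
    = MRL arr n' 0 := by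
  induction j with
  | zero => rw [PySem.List.pyRange_neg_one_eq_nil (by omega)]; rfl
  | succ j ih =>
    rw [show ((j + 1 : Nat) : Int) - 1 = (j : Int) by push_cast; ring,
      PySem.List.pyRange_neg_one_cons (by omega), List.foldl_cons]
    have hstep :
        PySem.List.pySetD (MRL arr n' (j + 1)) (j : Int)
          (ominA (PySem.List.pyGetD (MRL arr n' (j + 1)) ((j : Int) + 1) none)
            (PySem.List.pyGetD arr ((j : Int) + 1) 0)) = MRL arr n' j := by
      rw [show (j : Int) + 1 = ((j + 1 : Nat) : Int) by push_cast; ring,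
        PySem.List.pyGetD_natCast, PySem.List.pyGetD_natCast, PySem.List.pySetD_natCast]
      unfold MRL
      rw [List.getD_append_right _ _ _ _ (by simp), List.length_replicate, Nat.sub_self,
        PySem.List.getD_map_range _ _ _ _ (by omega), List.set_append]
      simp only [List.length_replicate]
      rw [if_pos (by omega), List.replicate_succ', List.set_append]
      simp only [List.length_replicate]
      rw [if_neg (by omega), Nat.sub_self, List.set_cons_zero]
      have hv : ominA (smin arr (j + 1 + 0 + 1) (n' - 1 - (j + 1 + 0))) (arr.getD (j + 1) 0)
          = smin arr (j + 1) (n' - 1 - j) := by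
        rw [show j + 1 + 0 + 1 = j + 1 + 1 by omega, show j + 1 + 0 = j + 1 by omega,
          show n' - 1 - j = (n' - 1 - (j + 1)) + 1 by omega]
        rfl
      rw [hv, show n' - j = (n' - (j + 1)) + 1 by omega, List.range_succ_eq_map]
      simp only [List.map_cons, List.map_map, List.append_assoc, List.singleton_append,
        Nat.add_zero]
      refine congrArg _ (congrArg (List.cons _) (List.map_congr_left ?_))
      intro t _
      simp only [Function.comp_apply, Nat.succ_eq_add_one]
      rw [show j + 1 + t + 1 = j + (t + 1) + 1 by omega,
        show n' - 1 - (j + 1 + t) = n' - 1 - (j + (t + 1)) by omega]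
    rw [hstep]
    exact ih (by omega)

-- ---------- B's monotonic stack ----------

-- min over one more element at the FAR end
theorem ominA_swap (o : Option Int) (a b : Int) :
    ominA (ominA o a) b = ominA (ominA o b) a := by
  cases o <;> simp [ominA] <;> omega

theorem smin_snoc (arr : List Int) (j k : Nat) :
    smin arr j (k + 1) = ominA (smin arr j k) (arr.getD (j + k) 0) := by
  induction k generalizing j with
  | zero => simp [smin, ominA]
  | succ k ih =>
    show ominA (smin arr (j + 1) (k + 1)) (arr.getD j 0) = _
    rw [ih (j + 1), ominA_swap, show j + 1 + k = j + (k + 1) by omega]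
    rfl

theorem oltR_ominA (a : Int) (o : Option Int) (v : Int) :
    oltR a (ominA o v) = (oltR a o && decide (a < v)) := by
  cases o <;> simp [oltR, ominA]

-- the prefix maximum dominates every earlier element
theorem pmax_ge (arr : List Int) {j k : Nat} (h : j < k) :
    ∃ m, pmax arr k = some m ∧ arr.getD j 0 ≤ m := by
  induction k with
  | zero => omega
  | succ k ih =>
    rcases Nat.lt_or_ge j k with hjk | hjk
    · obtain ⟨m, hm, hle⟩ := ih hjk
      exact ⟨max m (arr.getD k 0), by simp [pmax, hm, omaxA], le_trans hle (le_max_left _ _)⟩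
    · have : j = k := by omega
      subst this
      cases hp : pmax arr j with
      | none => exact ⟨arr.getD j 0, by simp [pmax, hp, omaxA], le_refl _⟩
      | some m => exact ⟨max m (arr.getD j 0), by simp [pmax, hp, omaxA], le_max_right _ _⟩

theorem pmax_lt (arr : List Int) {j k : Nat} {x : Int} (h : j < k)
    (hx : oltL (pmax arr k) x = true) : arr.getD j 0 < x := by
  obtain ⟨m, hm, hle⟩ := pmax_ge arr h
  rw [hm] at hx
  simp [oltL] at hx
  omega

-- on a strictly decreasing (top-first) stack, the pop loop is a value filter
theorem popGE_dec (x : Int) (l : List Int) (hd : l.Pairwise (fun a b => b < a)) :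
    popGE l x = l.filter (fun v => decide (v < x)) := by
  induction l with
  | nil => rfl
  | cons t rest ih =>
    rw [List.pairwise_cons] at hd
    by_cases hx : x ≤ t
    · rw [show popGE (t :: rest) x = popGE rest x from by simp [popGE, hx],
        ih hd.2, List.filter_cons_of_neg (by simp; omega)]
    · rw [show popGE (t :: rest) x = t :: rest from by simp [popGE, hx],
        List.filter_cons_of_pos (by simp; omega),
        List.filter_eq_self.mpr (fun v hv => by have := hd.1 v hv; simp; omega)]

-- the stack after i iterations: searchable-in-prefix indices, as values, top-first
def stk (arr : List Int) (i : Nat) : List Int :=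
  (((List.range i).filter (fun j => Pn arr i j)).map (fun j => arr.getD j 0)).reverse

theorem stk_dec (arr : List Int) (i : Nat) :
    (stk arr i).Pairwise (fun a b => b < a) := by
  unfold stk
  rw [List.pairwise_reverse, List.pairwise_map]
  have hsub : ((List.range i).filter (fun j => Pn arr i j)).Pairwise (· < ·) :=
    List.Pairwise.sublist List.filter_sublist List.pairwise_lt_range
  refine hsub.imp_of_mem ?_
  intro a b ha hb hab
  have hqb : Pn arr i b = true := List.of_mem_filter hb
  unfold Pn at hqb
  exact pmax_lt arr hab (by simp_all)

-- extending the prefix by one element: old candidates survive iff below the new value,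
-- and the new index joins iff it beats the prefix maximum
theorem filter_step (arr : List Int) (i : Nat) :
    (List.range (i + 1)).filter (fun j => Pn arr (i + 1) j)
    = (((List.range i).filter (fun j => Pn arr i j)).filter
        (fun j => decide (arr.getD j 0 < arr.getD i 0)))
      ++ (if oltL (pmax arr i) (arr.getD i 0) then [i] else []) := by
  rw [List.range_succ, List.filter_append, List.filter_filter]
  congr 1
  · apply List.filter_congr
    intro j hj
    have hji : j < i := List.mem_range.mp hj
    unfold Pn
    rw [show (i + 1) - 1 - j = (i - 1 - j) + 1 by omega,
      smin_snoc, show j + 1 + (i - 1 - j) = i by omega, oltR_ominA]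
    cases oltL (pmax arr j) (arr.getD j 0) <;>
      cases oltR (arr.getD j 0) (smin arr (j + 1) (i - 1 - j)) <;>
      cases hc : decide (arr.getD j 0 < arr.getD i 0) <;> simp_all
  · rw [List.filter_singleton]
    have hP : Pn arr (i + 1) i = oltL (pmax arr i) (arr.getD i 0) := by
      unfold Pn
      rw [show i + 1 - 1 - i = 0 by omega]
      cases oltL (pmax arr i) (arr.getD i 0) <;> simp [smin, oltR]
    rw [hP]
    cases oltL (pmax arr i) (arr.getD i 0) <;> simp

-- B's loop invariant
theorem bLoop (arr : List Int) (k : Nat) :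
    (PySem.List.pyRange 0 (k : Int) 1).foldl
      (fun (s : List Int × Option Int) i =>
        let x := PySem.List.pyGetD arr i 0
        let st := popGE s.1 x
        if s.2.isNone || decide (s.2.getD 0 < x) then (x :: st, some x) else (st, s.2))
      ([], none)
    = (stk arr k, pmax arr k) := by
  induction k with
  | zero =>
    rw [PySem.List.pyRange_one_eq_nil (by norm_num)]
    rfl
  | succ k ih =>
    rw [show ((k + 1 : Nat) : Int) = (k : Int) + 1 by push_cast; ring,
      PySem.List.pyRange_one_succ_right (by positivity), List.foldl_append, ih,
      List.foldl_cons, List.foldl_nil]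
    dsimp only
    rw [PySem.List.pyGetD_natCast]
    have hpush : ((pmax arr k).isNone || decide ((pmax arr k).getD 0 < arr.getD k 0))
        = oltL (pmax arr k) (arr.getD k 0) := by cases pmax arr k <;> simp [oltL]
    have hpop : popGE (stk arr k) (arr.getD k 0)
        = (stk arr k).filter (fun v => decide (v < arr.getD k 0)) :=
      popGE_dec _ _ (stk_dec arr k)
    have hstk : (if oltL (pmax arr k) (arr.getD k 0) then
          arr.getD k 0 :: ((stk arr k).filter (fun v => decide (v < arr.getD k 0)))
        else (stk arr k).filter (fun v => decide (v < arr.getD k 0))) = stk arr (k + 1) := by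
      unfold stk
      rw [filter_step arr k, List.map_append, List.reverse_append, List.filter_reverse,
        List.filter_map]
      cases h : oltL (pmax arr k) (arr.getD k 0) <;> simp [Function.comp_def]
    have hpm : (if oltL (pmax arr k) (arr.getD k 0) then some (arr.getD k 0) else pmax arr k)
        = pmax arr (k + 1) := by
      show _ = omaxA (pmax arr k) (arr.getD k 0)
      cases hp : pmax arr k with
      | none => rfl
      | some m =>
        rw [show oltL (some m) (arr.getD k 0) = decide (m < arr.getD k 0) from rfl]
        by_cases hmx : m < arr.getD k 0
        · rw [if_pos (decide_eq_true hmx)]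
          exact congrArg some (max_eq_right (le_of_lt hmx)).symm
        · rw [if_neg (by simpa using hmx)]
          exact congrArg some (max_eq_left (by omega)).symm
    rw [hpush, hpop]
    cases h : oltL (pmax arr k) (arr.getD k 0) <;>
      simp only [h, if_true, if_false, Bool.false_eq_true] at hstk hpm ⊢ <;>
      exact Prod.ext hstk hpm

-- ---------- main proof ----------

theorem binarySearchable_spec : Claim_equal_binarySearchable := by
  intro n arr _ hpre
  unfold Spec_binarySearchable binarySearchable binarySearchable_alt
  by_cases hn : n ≤ 0
  · simp only [PySem.List.pyRange_one_eq_nil hn,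
      PySem.List.pyRange_one_eq_nil (show n ≤ (1:Int) by omega),
      PySem.List.pyRange_neg_one_eq_nil (show n - 2 ≤ (-1:Int) by omega),
      List.foldl_nil]
    rfl
  · have hn' : ((n.toNat : Nat) : Int) = n := Int.toNat_of_nonneg (by omega)
    set n' := n.toNat with hdef
    have h1 : 1 ≤ n' := by omega
    rw [← hn']
    dsimp only
    rw [mlLoop arr n' n' h1 le_rfl, ← MRL_last arr n' h1,
      show ((n':Nat):Int) - 2 = ((n' - 1 : Nat) : Int) - 1 by omega,
      mrLoop arr n' (n' - 1) (by omega), MRL_zero]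
    rw [bLoop arr n', PySem.List.foldl_if_add_one]
    rw [PySem.List.pyRange_zero_nat, List.countP_map]
    have hA : List.countP
        ((fun i =>
          oltL (PySem.List.pyGetD (List.map (pmax arr) (List.range n') ++ List.replicate (n' - n') none) i none)
              (PySem.List.pyGetD arr i 0) &&
            oltR (PySem.List.pyGetD arr i 0)
              (PySem.List.pyGetD (List.map (fun t => smin arr (t + 1) (n' - 1 - t)) (List.range n')) i none))
          ∘ fun k => ((k : Nat) : Int)) (List.range n')
        = List.countP (Pn arr n') (List.range n') := by
      apply List.countP_congr
      intro i hi
      have hi' : i < n' := List.mem_range.mp hi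
      simp only [Function.comp_apply, PySem.List.pyGetD_natCast, Nat.sub_self,
        List.replicate_zero, List.append_nil]
      rw [PySem.List.getD_map_range _ _ _ _ hi', PySem.List.getD_map_range _ _ _ _ hi']
      rfl
    rw [hA]
    unfold stk
    rw [List.length_reverse, List.length_map, ← List.countP_eq_length_filter]
    ring
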